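-- pv_equiv track=rewrite | github.com/bradkef/total_integrated_info | equivalent_graphs.py | avoid_bidirect
-- ===== SOURCE A (Python) =====
-- def has_duplicate_sets(Y): # checks whether in an edgelist a bidirectional edge is contained.
--     lst=[]
--     for y in Y:
--         lst.append(set(y))
--     seen = []
--     for s in lst:
--         if s in seen:
--             return True
--         seen.append(s)
--     return False
--
-- def avoid_bidirect(X): # only keeps edge lists which have no bidirectional edges.
--     mylist=[]
--     for x in X:
--         if has_duplicate_sets(x):
--             continue
--         else:
--             mylist.append(x)
--
--     return mylist
-- ===== SOURCE B (Python) =====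
-- def avoid_bidirect(X):  # keep edge lists with no bidirectional (duplicate unordered) edge
--     out = []
--     for x in X:
--         es = sorted((a, b) if a <= b else (b, a) for a, b in x)
--         if all(p != q for p, q in zip(es, es[1:])):
--             out.append(x)
--     return out
-- ===== Notes on version B (the rewrite author's own statement) =====
-- stated objective: alternative
-- what changed: Replaced the growing seen-list scan with early exit by sort-then-scan: canonicalize each edge to an ordered pair, sort the edges, and check that no two adjacent sorted edges are equal.
import Mathlib
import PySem

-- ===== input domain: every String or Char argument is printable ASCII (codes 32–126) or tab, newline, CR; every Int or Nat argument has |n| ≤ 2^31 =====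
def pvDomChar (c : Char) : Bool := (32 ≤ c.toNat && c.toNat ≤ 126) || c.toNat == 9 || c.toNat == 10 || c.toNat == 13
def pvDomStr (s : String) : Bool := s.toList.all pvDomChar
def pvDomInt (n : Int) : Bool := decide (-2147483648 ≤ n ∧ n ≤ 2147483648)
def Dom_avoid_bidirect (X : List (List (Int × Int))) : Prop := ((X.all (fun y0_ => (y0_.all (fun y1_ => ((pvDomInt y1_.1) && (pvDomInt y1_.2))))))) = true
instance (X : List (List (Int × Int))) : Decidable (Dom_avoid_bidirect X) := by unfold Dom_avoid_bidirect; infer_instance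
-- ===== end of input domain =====

-- B sorts the canonicalized (ordered-pair) edges and rejects a list iff two adjacent
-- sorted edges are equal, instead of A's growing 'seen' list with early exit; objective: alternative.

-- ===== PORT A =====

-- Python 'set(y)' for an edge y = (a, b)
def pvEdgeSet (y : Int × Int) : PySem.Set Int := PySem.Set.ofList [y.1, y.2]

-- the second loop of has_duplicate_sets: 's in seen' is list membership by set equality
def pvSeenLoop (lst seen : List (PySem.Set Int)) : Bool :=
  match lst with
  | [] => false
  | s :: rest =>
    if seen.any (fun t => PySem.Set.equal t s) then true
    else pvSeenLoop rest (seen ++ [s])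

def has_duplicate_sets (Y : List (Int × Int)) : Bool :=
  pvSeenLoop (Y.map pvEdgeSet) []

def avoid_bidirect (X : List (List (Int × Int))) : List (List (Int × Int)) :=
  X.foldl (fun mylist x => if has_duplicate_sets x then mylist else mylist ++ [x]) []

-- ===== PORT B =====

-- '(a, b) if a <= b else (b, a)' for an edge (a, b)
def pvCanon (y : Int × Int) : Int × Int := if y.1 ≤ y.2 then (y.1, y.2) else (y.2, y.1)

def avoid_bidirect_alt (X : List (List (Int × Int))) : List (List (Int × Int)) :=
  X.foldl
    (fun out x =>
      let es := PySem.List.sorted2 (x.map pvCanon) Prod.fst Prod.snd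
      if (es.zip es.tail).all (fun pq => pq.1 != pq.2) then out ++ [x] else out)
    []

-- ===== PRECONDITION & SPEC =====
def Spec_avoid_bidirect (X : List (List (Int × Int))) (out : List (List (Int × Int))) : Prop := out = avoid_bidirect_alt X
instance (X : List (List (Int × Int))) (out : List (List (Int × Int))) : Decidable (Spec_avoid_bidirect X out) := by unfold Spec_avoid_bidirect; infer_instance

-- ===== CLAIM (what is proved, stated in full; the proofs are below) =====
def Claim_equal_avoid_bidirect : Prop := ∀ (X : List (List (Int × Int))), Dom_avoid_bidirect X → Spec_avoid_bidirect X (avoid_bidirect X)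

-- ===== LEMMAS AND PROOFS =====

-- weak lexicographic order on Int pairs (abbreviation for the proofs)
def pvLexLe (a b : Int × Int) : Prop := a.1 < b.1 ∨ (a.1 = b.1 ∧ a.2 ≤ b.2)

-- the strict-lex 'before' relation sorted2 uses, unfolded
lemma lexBefore_iff (a b : Int × Int) :
    (decide (a.1 < b.1) || !decide (b.1 < a.1) && decide (a.2 < b.2)) = true ↔
      a.1 < b.1 ∨ (a.1 = b.1 ∧ a.2 < b.2) := by
  simp only [Bool.or_eq_true, Bool.and_eq_true, Bool.not_eq_true', decide_eq_true_eq,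
    decide_eq_false_iff_not]
  omega

-- insertBy with the strict-lex comparator preserves weak-lex pairwise order
lemma insertBy_lex_pairwise (x : Int × Int) (ys : List (Int × Int))
    (h : ys.Pairwise pvLexLe) :
    (PySem.List.insertBy
      (fun a b => decide (a.1 < b.1) || !decide (b.1 < a.1) && decide (a.2 < b.2)) x ys).Pairwise
      pvLexLe := by
  induction ys with
  | nil => simp [PySem.List.insertBy]
  | cons y ys ih =>
    rw [List.pairwise_cons] at h
    simp only [PySem.List.insertBy]
    by_cases hb : (decide (x.1 < y.1) || !decide (y.1 < x.1) && decide (x.2 < y.2)) = true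
    · rw [if_pos hb]
      have hxy : pvLexLe x y := by
        rcases (lexBefore_iff x y).mp hb with h' | ⟨h1, h2⟩
        · exact Or.inl h'
        · exact Or.inr ⟨h1, le_of_lt h2⟩
      refine List.pairwise_cons.mpr ⟨?_, List.pairwise_cons.mpr h⟩
      intro z hz
      rcases List.mem_cons.mp hz with rfl | hz
      · exact hxy
      · have hyz := h.1 z hz
        unfold pvLexLe at *; omega
    · rw [if_neg hb]
      have hyx : pvLexLe y x := by
        have := (lexBefore_iff x y).not.mp (by simpa using hb)
        unfold pvLexLe; omega
      refine List.pairwise_cons.mpr ⟨?_, ih h.2⟩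
      intro z hz
      rcases (PySem.List.mem_insertBy _ _ _ _).mp hz with rfl | hz
      · exact hyx
      · exact h.1 z hz

-- the sorted2 output is weakly lex-sorted
lemma sorted2_lex_pairwise (xs : List (Int × Int)) :
    (PySem.List.sorted2 xs Prod.fst Prod.snd).Pairwise pvLexLe := by
  show (xs.foldl (fun acc x => PySem.List.insertBy _ x acc) []).Pairwise pvLexLe
  have : ∀ (acc : List (Int × Int)), acc.Pairwise pvLexLe →
      (xs.foldl (fun acc x => PySem.List.insertBy
        (fun a b => decide (a.1 < b.1) || !decide (b.1 < a.1) && decide (a.2 < b.2)) x acc)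
        acc).Pairwise pvLexLe := by
    induction xs with
    | nil => intro acc h; simpa using h
    | cons x xs ih =>
      intro acc h
      exact ih _ (insertBy_lex_pairwise x acc h)
  exact this [] (by simp)

-- antisymmetry of the weak lex order
lemma pvLexLe_antisymm (a b : Int × Int) (h1 : pvLexLe a b) (h2 : pvLexLe b a) : a = b := by
  unfold pvLexLe at h1 h2
  rcases a with ⟨a1, a2⟩; rcases b with ⟨b1, b2⟩
  simp only [Prod.mk.injEq]
  omega

-- on a weakly lex-sorted list, the adjacent-distinct scan decides Nodup
lemma sorted_zip_ne_iff_nodup (es : List (Int × Int)) (hs : es.Pairwise pvLexLe) :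
    ((es.zip es.tail).all (fun pq => pq.1 != pq.2) = true) ↔ es.Nodup := by
  induction es with
  | nil => simp
  | cons a l ih =>
    cases l with
    | nil => simp
    | cons b l' =>
      rw [List.pairwise_cons] at hs
      simp only [List.tail_cons, List.zip_cons_cons, List.all_cons, Bool.and_eq_true,
        bne_iff_ne, ne_eq, List.nodup_cons]
      have ihh := ih hs.2
      simp only [List.tail_cons] at ihh
      rw [ihh]
      constructor
      · rintro ⟨hab, hrest⟩
        have hrest' := List.nodup_cons.mp hrest
        refine ⟨?_, hrest'.1, hrest'.2⟩
        intro hmem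
        rcases List.mem_cons.mp hmem with rfl | hmem'
        · exact hab rfl
        · have h1 : pvLexLe a b := hs.1 b List.mem_cons_self
          have h2 : pvLexLe b a := (List.pairwise_cons.mp hs.2).1 a hmem'
          exact hab (pvLexLe_antisymm a b h1 h2)
      · rintro ⟨hamem, hnd⟩
        exact ⟨fun h => hamem (h ▸ List.mem_cons_self), List.nodup_cons.mpr hnd⟩

-- B's per-element test succeeds iff the canonical edges are pairwise distinct
lemma alt_pred_iff (x : List (Int × Int)) :
    (((PySem.List.sorted2 (x.map pvCanon) Prod.fst Prod.snd).zip
        (PySem.List.sorted2 (x.map pvCanon) Prod.fst Prod.snd).tail).all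
      (fun pq => pq.1 != pq.2) = true) ↔ (x.map pvCanon).Nodup := by
  rw [sorted_zip_ne_iff_nodup _ (sorted2_lex_pairwise (x.map pvCanon))]
  exact (PySem.List.sorted2_perm (x.map pvCanon) Prod.fst Prod.snd false).nodup_iff

-- two 2-element Python sets are equal iff the canonical pairs agree
lemma edgeSet_equal_iff (y z : Int × Int) :
    PySem.Set.equal (pvEdgeSet y) (pvEdgeSet z) = true ↔ pvCanon y = pvCanon z := by
  rw [PySem.Set.equal_iff]
  unfold pvEdgeSet pvCanon
  constructor
  · intro h
    have h1 := (h y.1).mp (by simp [PySem.Set.mem_ofList])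
    have h2 := (h y.2).mp (by simp [PySem.Set.mem_ofList])
    have h3 := (h z.1).mpr (by simp [PySem.Set.mem_ofList])
    have h4 := (h z.2).mpr (by simp [PySem.Set.mem_ofList])
    simp [PySem.Set.mem_ofList] at h1 h2 h3 h4
    split_ifs with hy hz hz <;> simp [Prod.ext_iff] <;> omega
  · intro h x
    simp [PySem.Set.mem_ofList]
    split_ifs at h with hy hz hz <;> simp [Prod.ext_iff] at h <;> omega

-- loop invariant for the seen-scan of has_duplicate_sets
lemma seenLoop_false_iff (Y ms : List (Int × Int)) (hms : (ms.map pvCanon).Nodup) :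
    pvSeenLoop (Y.map pvEdgeSet) (ms.map pvEdgeSet) = false ↔ ((ms ++ Y).map pvCanon).Nodup := by
  induction Y generalizing ms with
  | nil => simpa [pvSeenLoop] using hms
  | cons y Y ih =>
    simp only [List.map_cons, pvSeenLoop]
    have hany : (ms.map pvEdgeSet).any (fun t => PySem.Set.equal t (pvEdgeSet y)) = true
        ↔ pvCanon y ∈ ms.map pvCanon := by
      simp only [List.any_map, List.any_eq_true, Function.comp]
      constructor
      · rintro ⟨m, hm, he⟩
        exact List.mem_map.mpr ⟨m, hm, (edgeSet_equal_iff m y).mp he⟩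
      · intro h
        rcases List.mem_map.mp h with ⟨m, hm, he⟩
        exact ⟨m, hm, (edgeSet_equal_iff m y).mpr he⟩
    by_cases hmem : pvCanon y ∈ ms.map pvCanon
    · rw [if_pos (hany.mpr hmem)]
      constructor
      · intro h; cases h
      · intro h
        exfalso
        rw [List.map_append] at h
        exact List.disjoint_of_nodup_append h hmem
          (by simp only [List.map_cons]; exact List.mem_cons_self)
    · rw [if_neg (fun hc => hmem (hany.mp hc))]
      have hms' : ((ms ++ [y]).map pvCanon).Nodup := by
        simp only [List.map_append, List.map_cons, List.map_nil]
        exact List.Nodup.append hms (by simp)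
          (by intro a ha hb; exact hmem (List.eq_of_mem_singleton hb ▸ ha))
      have := ih (ms ++ [y]) hms'
      rw [show (ms ++ [y]).map pvEdgeSet = ms.map pvEdgeSet ++ [pvEdgeSet y] by simp] at this
      rw [this, List.append_assoc]
      rfl

lemma hds_false_iff (x : List (Int × Int)) :
    has_duplicate_sets x = false ↔ (x.map pvCanon).Nodup := by
  have := seenLoop_false_iff x [] (by simp)
  simpa [has_duplicate_sets] using this

-- the two per-element tests agree (as Bools, negated)
lemma pred_eq (x : List (Int × Int)) :
    (!has_duplicate_sets x) =
      (((PySem.List.sorted2 (x.map pvCanon) Prod.fst Prod.snd).zip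
          (PySem.List.sorted2 (x.map pvCanon) Prod.fst Prod.snd).tail).all
        (fun pq => pq.1 != pq.2)) := by
  by_cases h : has_duplicate_sets x
  · simp only [h, Bool.not_true]
    symm
    rw [Bool.eq_false_iff]
    intro hall
    have := (hds_false_iff x).mpr ((alt_pred_iff x).mp hall)
    simp [h] at this
  · simp only [Bool.not_eq_true] at h
    simp only [h, Bool.not_false]
    symm
    exact (alt_pred_iff x).mpr ((hds_false_iff x).mp h)

-- A's foldl with append is a filter
lemma foldl_a_filter (X : List (List (Int × Int))) (acc : List (List (Int × Int))) :
    X.foldl (fun mylist x => if has_duplicate_sets x then mylist else mylist ++ [x]) acc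
      = acc ++ X.filter (fun x => !has_duplicate_sets x) := by
  induction X generalizing acc with
  | nil => simp
  | cons x X ih =>
    simp only [List.foldl_cons, List.filter_cons]
    by_cases h : has_duplicate_sets x
    · simp [h, ih]
    · simp only [Bool.not_eq_true] at h
      simp [h, ih]

-- B's foldl with append is a filter
lemma foldl_b_filter (X : List (List (Int × Int))) (acc : List (List (Int × Int))) :
    X.foldl
        (fun out x =>
          let es := PySem.List.sorted2 (x.map pvCanon) Prod.fst Prod.snd
          if (es.zip es.tail).all (fun pq => pq.1 != pq.2) then out ++ [x] else out)
        acc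
      = acc ++ X.filter (fun x =>
          ((PySem.List.sorted2 (x.map pvCanon) Prod.fst Prod.snd).zip
            (PySem.List.sorted2 (x.map pvCanon) Prod.fst Prod.snd).tail).all
            (fun pq => pq.1 != pq.2)) := by
  induction X generalizing acc with
  | nil => simp
  | cons x X ih =>
    simp only [List.foldl_cons, List.filter_cons]
    by_cases h : ((PySem.List.sorted2 (x.map pvCanon) Prod.fst Prod.snd).zip
        (PySem.List.sorted2 (x.map pvCanon) Prod.fst Prod.snd).tail).all
        (fun pq => pq.1 != pq.2)
    · simp only [h, if_pos]
      simp [ih]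
    · simp only [Bool.not_eq_true] at h
      simp [h, ih]

-- ===== VERDICT (by name: the statement is the Claim_ definition above) =====
theorem avoid_bidirect_spec : Claim_equal_avoid_bidirect := by
  intro X _
  unfold Spec_avoid_bidirect avoid_bidirect avoid_bidirect_alt
  rw [foldl_a_filter, foldl_b_filter, List.nil_append, List.nil_append]
  exact List.filter_congr fun x _ => pred_eq x
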